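-- pv_equiv track=rewrite | github.com/shubhtech/Kaggle | Python/blackjack.py | blackjack_hand_greater_than
-- ===== SOURCE A (Python) =====
-- def blackjack_hand_greater_than(hand_1, hand_2):
--       count1 = 0
--       count2 = 0
-- ###################
--       for i in hand_1:
--         #print (i)
--             if i == 'J'or i == 'K' or i == 'Q':
--                   count1 = count1 + 10
--                   continue
--             if i == 'A':
--                   count1 = count1 + 11
--                   continue
--             else:
--                   count1 = count1 + int(i)
--       print ('set 1 done')
-- ########################
--       for i in hand_2:
--         #print (i)
--             if i == 'J'or i == 'K' or i == 'Q':
--                   count2 = count2 + 10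
--                   continue
--             if i == 'A':
--                   count2 = count2 + 11
--                   continue
--             else:
--                   count2 = count2 + int(i)
--       print ('set 2 done')
-- #################################
--       for i in hand_1:
--             if count1 > 21 and i == 'A':
--                   count1 = count1 - 10
--                   #print (count1)
-- ###################
--       for i in hand_2:
--             if count2 > 21 and i == 'A':
--                   count2 = count2 - 10
--                   #print (count2)
--       print (count1, count2)
-- ############################
--       if count1 <= 21:
--             if count2 <= 21:
--                   if count1 > count2:
--                         print ('set1')
--                         return True
--                   else:
--                         print ('set2')
--                         return False
--             else:
--                   print ('set1')
--                   return True
--       else: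
--             print ('wrong')
--             return False
-- ===== SOURCE B (Python) =====
-- def blackjack_hand_greater_than(hand_1, hand_2):
--     scores = []
--     for label, hand in ((1, hand_1), (2, hand_2)):
--         low = sum(10 if c in ('J', 'Q', 'K') else 1 if c == 'A' else int(c)
--                   for c in hand)
--         print(f'set {label} done')
--         if low > 21:
--             scores.append(low)
--         else:
--             scores.append(low + 10 * min(hand.count('A'), (21 - low) // 10))
--     s1, s2 = scores
--     print(s1, s2)
--     if s1 > 21:
--         print('wrong')
--         return False
--     if s2 > 21 or s1 > s2:
--         print('set1')
--         return True
--     print('set2')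
--     return False
-- ===== Notes on version B (the rewrite author's own statement) =====
-- stated objective: alternative
-- what changed: B scores each hand by summing with aces valued 1 and then choosing the number of aces to upgrade to 11 in closed form (min(aces, (21-low)//10)), eliminating A's separate ace-demotion rescan loop entirely; both hands are handled by one loop over (label, hand) pairs.
import Mathlib
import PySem

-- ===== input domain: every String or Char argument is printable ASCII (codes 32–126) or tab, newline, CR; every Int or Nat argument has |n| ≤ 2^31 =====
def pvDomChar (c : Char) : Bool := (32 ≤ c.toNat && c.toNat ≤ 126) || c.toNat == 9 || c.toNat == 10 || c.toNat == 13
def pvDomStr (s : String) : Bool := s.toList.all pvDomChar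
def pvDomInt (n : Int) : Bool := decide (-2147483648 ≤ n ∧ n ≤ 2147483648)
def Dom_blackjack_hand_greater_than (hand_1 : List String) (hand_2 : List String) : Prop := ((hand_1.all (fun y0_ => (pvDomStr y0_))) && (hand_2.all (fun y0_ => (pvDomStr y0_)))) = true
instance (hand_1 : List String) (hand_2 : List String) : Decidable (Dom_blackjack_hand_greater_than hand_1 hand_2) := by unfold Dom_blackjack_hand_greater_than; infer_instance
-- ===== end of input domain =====

-- B scores each hand in one pass with aces valued 1 and upgrades aces to 11 by a closed
-- formula (min(aces, (21-low)//10)) instead of A's demotion rescan loop; the equivalence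
-- proved here is about the return value only (Source B also reproduces A's prints, checked by
-- testing, not proved). Pre_ excludes hands on which int(i) raises ValueError.

-- ===== PORT A =====
-- card value used by A's first two loops; (ofStr? i).getD 0: Pre_ guarantees isSome for non-face cards
def pvCardVal (i : String) : Int :=
  if i = "J" ∨ i = "K" ∨ i = "Q" then 10
  else if i = "A" then 11
  else (PySem.Int.ofStr? i).getD 0

-- A's per-hand summing loop
def pvCount (hand : List String) : Int :=
  hand.foldl (fun c i => c + pvCardVal i) 0

-- A's per-hand ace-adjustment loop
def pvAdjust (hand : List String) (c : Int) : Int :=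
  hand.foldl (fun c i => if c > 21 ∧ i = "A" then c - 10 else c) c

def blackjack_hand_greater_than (hand_1 : List String) (hand_2 : List String) : Bool :=
  let count1 := pvAdjust hand_1 (pvCount hand_1)
  let count2 := pvAdjust hand_2 (pvCount hand_2)
  if count1 ≤ 21 then
    if count2 ≤ 21 then
      if count1 > count2 then true else false
    else true
  else false

-- ===== PORT B =====
-- B's per-hand score: low total (aces as 1), then the closed-form ace upgrade
def pvScoreB (hand : List String) : Int :=
  let low := (hand.map (fun c =>
    if c ∈ ["J", "Q", "K"] then (10 : Int)
    else if c = "A" then 1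
    else (PySem.Int.ofStr? c).getD 0)).sum
  if low > 21 then low
  else low + 10 * min ((hand.count "A" : Int)) (PySem.Int.floordiv (21 - low) 10)

def blackjack_hand_greater_than_alt (hand_1 : List String) (hand_2 : List String) : Bool :=
  let s1 := pvScoreB hand_1
  let s2 := pvScoreB hand_2
  if s1 > 21 then false
  else if s2 > 21 ∨ s1 > s2 then true
  else false

-- ===== PRECONDITION & SPEC =====
-- Pre_ excludes exactly the hands containing a card that is neither J/K/Q/A nor int()-parseable,
-- on which Python A (and B) raise ValueError.
def pvFaceOrAce (i : String) : Bool :=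
  i.toList.length == 1 && "JKQA".toList.contains i.toList.headI
def Pre_blackjack_hand_greater_than (hand_1 : List String) (hand_2 : List String) : Prop :=
  ∀ i ∈ hand_1 ++ hand_2, pvFaceOrAce i = true ∨ (PySem.Int.ofStr? i).isSome = true
instance (hand_1 : List String) (hand_2 : List String) : Decidable (Pre_blackjack_hand_greater_than hand_1 hand_2) := by unfold Pre_blackjack_hand_greater_than; infer_instance

def pvWitness_blackjack_hand_greater_than : List String × List String := (["A", "2", "3"], ["10", "J", "Q", "K"])

def Spec_blackjack_hand_greater_than (hand_1 : List String) (hand_2 : List String) (out : Bool) : Prop := out = blackjack_hand_greater_than_alt hand_1 hand_2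
instance (hand_1 : List String) (hand_2 : List String) (out : Bool) : Decidable (Spec_blackjack_hand_greater_than hand_1 hand_2 out) := by unfold Spec_blackjack_hand_greater_than; infer_instance

-- ===== CLAIM (what is proved, stated in full; the proofs are below) =====
def Claim_equal_blackjack_hand_greater_than : Prop := ∀ (hand_1 : List String) (hand_2 : List String), Dom_blackjack_hand_greater_than hand_1 hand_2 → Pre_blackjack_hand_greater_than hand_1 hand_2 → Spec_blackjack_hand_greater_than hand_1 hand_2 (blackjack_hand_greater_than hand_1 hand_2)

-- ===== LEMMAS AND PROOFS =====

-- proof-side helper: iterated single demotion (what A's adjust loop amounts to)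
def pvSettle (total : Int) : Nat → Int
  | 0 => total
  | n + 1 => if total > 21 then pvSettle (total - 10) n else total

-- per-card: A's value is B's low value, plus 10 when the card is an ace
theorem pvCardVal_eq (i : String) :
    pvCardVal i = (if i ∈ ["J", "Q", "K"] then (10 : Int)
      else if i = "A" then 1
      else (PySem.Int.ofStr? i).getD 0) + (if i = "A" then 10 else 0) := by
  by_cases hJ : i = "J" ∨ i = "K" ∨ i = "Q"
  · have hA : ¬ i = "A" := by rcases hJ with h | h | h <;> simp [h]
    have hmem : i ∈ ["J", "Q", "K"] := by rcases hJ with h | h | h <;> simp [h]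
    simp [pvCardVal, hJ, hA, hmem]
  · have hmem : i ∉ ["J", "Q", "K"] := by
      simp only [List.mem_cons, List.not_mem_nil, or_false]
      intro h; apply hJ; tauto
    by_cases hA : i = "A" <;> simp [pvCardVal, hJ, hA, hmem]

-- B's low sum relates to A's sum: A counts each ace as 11, B as 1
theorem pvCount_eq_low (hand : List String) : ∀ (t : Int),
    hand.foldl (fun c i => c + pvCardVal i) t
    = t + (hand.map (fun c =>
        if c ∈ ["J", "Q", "K"] then (10 : Int)
        else if c = "A" then 1
        else (PySem.Int.ofStr? c).getD 0)).sum + 10 * (hand.count "A" : Int) := by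
  induction hand with
  | nil => intro t; simp
  | cons i tl ih =>
    intro t
    rw [List.foldl_cons, ih, List.map_cons, List.sum_cons, List.count_cons, pvCardVal_eq i]
    by_cases hA : i = "A"
    · simp [hA]; ring
    · simp [hA]; ring

theorem pvAdjust_of_le (hand : List String) : ∀ (c : Int), c ≤ 21 → pvAdjust hand c = c := by
  induction hand with
  | nil => intro c _; rfl
  | cons i tl ih =>
    intro c hc
    have : ¬ (c > 21 ∧ i = "A") := by omega
    simp [pvAdjust, List.foldl_cons, this] at *
    exact ih c hc

-- A's ace-adjustment loop equals iterated demotion, once per ace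
theorem pvAdjust_eq_settle (hand : List String) : ∀ (c : Int),
    pvAdjust hand c = pvSettle c (hand.count "A") := by
  induction hand with
  | nil => intro c; rfl
  | cons i tl ih =>
    intro c
    by_cases hA : i = "A"
    · by_cases hc : c > 21
      · simp [pvAdjust, List.foldl_cons, hA, hc, pvSettle]
        exact ih (c - 10)
      · have h1 : pvAdjust tl c = c := pvAdjust_of_le tl c (by omega)
        simp [pvAdjust, List.foldl_cons, hA, hc, pvSettle] at *
        exact h1
    · simp [pvAdjust, List.foldl_cons, hA] at *
      exact ih c

-- iterated demotion from low + 10*a equals B's closed form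
theorem pvSettle_closed (a : Nat) : ∀ (low : Int),
    pvSettle (low + 10 * a) a
    = if low > 21 then low
      else low + 10 * min ((a : Int)) (PySem.Int.floordiv (21 - low) 10) := by
  induction a with
  | zero =>
    intro low
    have hq : PySem.Int.floordiv (21 - low) 10 = (21 - low) / 10 :=
      PySem.Int.floordiv_eq_ediv_of_pos (by omega)
    rw [hq, pvSettle]
    split_ifs with h
    · simp
    · omega
  | succ n ih =>
    intro low
    have hq : PySem.Int.floordiv (21 - low) 10 = (21 - low) / 10 :=
      PySem.Int.floordiv_eq_ediv_of_pos (by omega)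
    rw [pvSettle, hq]
    by_cases hgt : low + 10 * ((n + 1 : Nat) : Int) > 21
    · rw [if_pos hgt]
      have h10 : low + 10 * ((n + 1 : Nat) : Int) - 10 = low + 10 * (n : Int) := by
        push_cast; ring
      rw [h10, ih low, hq]
      split_ifs with h
      · rfl
      · push_cast at hgt ⊢
        omega
    · rw [if_neg hgt, if_neg (by push_cast at hgt; omega)]
      push_cast at hgt ⊢
      omega

-- A's two-stage per-hand computation equals B's score
theorem pvScoreB_eq (hand : List String) : pvAdjust hand (pvCount hand) = pvScoreB hand := by
  rw [pvAdjust_eq_settle]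
  unfold pvCount pvScoreB
  rw [pvCount_eq_low hand 0]
  rw [zero_add, pvSettle_closed]

-- ===== VERDICT (by name: the statement is the Claim_ definition above) =====
theorem blackjack_hand_greater_than_spec : Claim_equal_blackjack_hand_greater_than := by
  intro hand_1 hand_2 _ _
  unfold Spec_blackjack_hand_greater_than blackjack_hand_greater_than blackjack_hand_greater_than_alt
  rw [pvScoreB_eq, pvScoreB_eq]
  set s1 := pvScoreB hand_1
  set s2 := pvScoreB hand_2
  dsimp only
  split_ifs <;> first | rfl | omega
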